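-- pv_equiv track=rewrite | github.com/prakash-python/Practice_Problems | left_greater_values_founding.py | left_greater_values
-- ===== SOURCE A (Python) =====
-- def left_greater_values(x):
--     is_all_le = True
--     output = []
--     for i in range(len(x)-1):
--
--         for j in range(i+1,len(x)):
--
--             if x[i] < x[j]:
--                 is_all_le = False
--                 break
--             else:
--                 is_all_le = True
--         if is_all_le:
--             output.append(x[i])
--
--     output.append(x[len(x)-1])
--     return output
-- ===== SOURCE B (Python) =====
-- def left_greater_values(x):
--     out = []
--     m = None
--     for v in reversed(x):
--         if m is None or v >= m:
--             m = v
--             out.append(v)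
--     out.reverse()
--     return out
-- ===== Notes on version B (the rewrite author's own statement) =====
-- stated objective: faster
-- what changed: Replaced the quadratic nested index scan (for each i, rescan the whole suffix) by a single right-to-left pass that tracks the running suffix maximum and keeps each element that is >= it.
import Mathlib
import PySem

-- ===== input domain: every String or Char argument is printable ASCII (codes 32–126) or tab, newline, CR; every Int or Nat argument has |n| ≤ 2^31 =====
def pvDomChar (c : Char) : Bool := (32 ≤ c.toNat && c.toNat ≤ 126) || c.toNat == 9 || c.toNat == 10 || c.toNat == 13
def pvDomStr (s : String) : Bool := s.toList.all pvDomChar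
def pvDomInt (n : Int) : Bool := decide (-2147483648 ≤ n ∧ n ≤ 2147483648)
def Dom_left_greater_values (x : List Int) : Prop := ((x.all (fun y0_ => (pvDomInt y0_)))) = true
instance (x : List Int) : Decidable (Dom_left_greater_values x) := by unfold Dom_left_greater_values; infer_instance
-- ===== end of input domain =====

-- B replaces A's quadratic nested suffix scan by one right-to-left pass tracking the suffix maximum (asymptotically faster, measured).


-- ===== PORT A =====
-- inner 'for j in range(i+1, len(x))' loop with its break, threading is_all_le
def lgvInner (x : List Int) (xi : Int) (js : List Int) (acc : Bool) : Bool :=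
  match js with
  | [] => acc
  | j :: rest =>
    if xi < PySem.List.pyGetD x j 0 then false
    else lgvInner x xi rest true

def left_greater_values (x : List Int) : List Int :=
  let n : Int := x.length
  let st := (PySem.List.pyRange 0 (n - 1) 1).foldl
    (fun (st : Bool × List Int) i =>
      let xi := PySem.List.pyGetD x i 0
      let b := lgvInner x xi (PySem.List.pyRange (i + 1) n 1) st.1
      (b, if b then st.2 ++ [xi] else st.2))
    (true, [])
  st.2 ++ [PySem.List.pyGetD x (n - 1) 0]

-- ===== PORT B =====
-- one step of B's reversed-iteration loop: m is the suffix maximum so far (None before the first element)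
def lgvStep (st : Option Int × List Int) (v : Int) : Option Int × List Int :=
  match st.1 with
  | none => (some v, st.2 ++ [v])
  | some m => if m ≤ v then (some v, st.2 ++ [v]) else st

def left_greater_values_alt (x : List Int) : List Int :=
  ((x.reverse.foldl lgvStep (none, [])).2).reverse

-- ===== PRECONDITION & SPEC =====
-- Pre_ excludes only the empty list, on which A raises IndexError (x[len(x)-1]).
def Pre_left_greater_values (x : List Int) : Prop := x ≠ []
instance (x : List Int) : Decidable (Pre_left_greater_values x) := by unfold Pre_left_greater_values; infer_instance
def pvWitness_left_greater_values : List Int := [3, 1, 2]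

def Spec_left_greater_values (x : List Int) (out : List Int) : Prop := out = left_greater_values_alt x
instance (x : List Int) (out : List Int) : Decidable (Spec_left_greater_values x out) := by unfold Spec_left_greater_values; infer_instance

-- ===== CLAIM (what is proved, stated in full; the proofs are below) =====
def Claim_equal_left_greater_values : Prop := ∀ (x : List Int), Dom_left_greater_values x → Pre_left_greater_values x → Spec_left_greater_values x (left_greater_values x)

-- ===== LEMMAS AND PROOFS =====

-- reference function: keep each element that is ≥ every element to its right
def lgvKeep : List Int → List Int
  | [] => []
  | a :: l => if l.all (fun y => decide (y ≤ a)) then a :: lgvKeep l else lgvKeep l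

def lgvMax : List Int → Option Int
  | [] => none
  | a :: l =>
    match lgvMax l with
    | none => some a
    | some m => some (max a m)

theorem lgvMax_eq_none {l : List Int} : lgvMax l = none ↔ l = [] := by
  cases l with
  | nil => simp [lgvMax]
  | cons a t => simp [lgvMax]; cases lgvMax t <;> simp

theorem lgvMax_le {l : List Int} {m a : Int} (h : lgvMax l = some m) :
    (m ≤ a ↔ ∀ y ∈ l, y ≤ a) := by
  induction l generalizing m with
  | nil => simp [lgvMax] at h
  | cons b t ih =>
    simp only [lgvMax] at h
    cases ht : lgvMax t with
    | none =>
      rw [ht] at h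
      obtain rfl : b = m := by simpa using h
      have : t = [] := lgvMax_eq_none.mp ht
      subst this; simp
    | some m' =>
      rw [ht] at h
      obtain rfl : max b m' = m := by simpa using h
      simp [max_le_iff, ih ht, forall_and]

theorem lgvB_inv (l : List Int) :
    l.foldr (fun a st => lgvStep st a) (none, []) = (lgvMax l, (lgvKeep l).reverse) := by
  induction l with
  | nil => simp [lgvMax, lgvKeep]
  | cons a t ih =>
    simp only [List.foldr_cons, ih]
    cases ht : lgvMax t with
    | none =>
      have : t = [] := lgvMax_eq_none.mp ht
      subst this
      simp [lgvStep, lgvMax, lgvKeep]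
    | some m =>
      have hme : t ≠ [] := fun he => by simp [he, lgvMax] at ht
      by_cases hle : m ≤ a
      · have hall : t.all (fun y => decide (y ≤ a)) = true := by
          simp only [List.all_eq_true, decide_eq_true_eq]
          exact (lgvMax_le ht).mp hle
        simp [lgvStep, hle, lgvMax, ht, lgvKeep, hall, max_eq_left ((lgvMax_le ht).mpr
          (fun y hy => ((lgvMax_le ht).mp hle) y hy))]
      · have hall : ¬ (t.all (fun y => decide (y ≤ a)) = true) := by
          simp only [List.all_eq_true, decide_eq_true_eq]
          intro hf; exact hle ((lgvMax_le ht).mpr hf)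
        have hmax : max a m = m := max_eq_right (le_of_not_ge (fun hge => hle hge))
        simp [lgvStep, hle, lgvMax, ht, lgvKeep, hall, hmax]

theorem lgvB_eq_keep (x : List Int) : left_greater_values_alt x = lgvKeep x := by
  unfold left_greater_values_alt
  rw [List.foldl_reverse, lgvB_inv]
  simp

-- A's inner loop with acc = true is the 'all' of the remaining indices
theorem lgvInner_true (x : List Int) (xi : Int) (js : List Int) :
    lgvInner x xi js true = js.all (fun j => decide (PySem.List.pyGetD x j 0 ≤ xi)) := by
  induction js with
  | nil => simp [lgvInner]
  | cons j rest ih =>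
    simp only [lgvInner, List.all_cons, ih]
    by_cases h : xi < PySem.List.pyGetD x j 0
    · simp [h, not_le.mpr h]
    · simp [h, not_lt.mp h]

theorem lgvInner_ne_nil (x : List Int) (xi : Int) (j : Int) (rest : List Int) (acc : Bool) :
    lgvInner x xi (j :: rest) acc
      = (j :: rest).all (fun j => decide (PySem.List.pyGetD x j 0 ≤ xi)) := by
  simp only [lgvInner, List.all_cons, lgvInner_true]
  by_cases h : xi < PySem.List.pyGetD x j 0
  · simp [h, not_le.mpr h]
  · simp [h, not_lt.mp h]

-- the structural condition B's suffix test amounts to, over Nat indices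
def lgvCond (x : List Int) (k : Nat) : Bool :=
  (x.drop (k + 1)).all (fun v => decide (v ≤ x.getD k 0))

theorem lgvCond_of_range (x : List Int) (k : Nat) :
    (PySem.List.pyRange ((k : Int) + 1) (x.length : Int) 1).all
        (fun j => decide (PySem.List.pyGetD x j 0 ≤ PySem.List.pyGetD x (k : Int) 0))
      = lgvCond x k := by
  have hmap := PySem.List.map_pyGetD_pyRange' (xs := x) (a := (k : Int) + 1) (d := 0)
    (by positivity)
  have hall : (PySem.List.pyRange ((k : Int) + 1) (x.length : Int) 1).all
        (fun j => decide (PySem.List.pyGetD x j 0 ≤ PySem.List.pyGetD x (k : Int) 0))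
      = ((PySem.List.pyRange ((k : Int) + 1) (x.length : Int) 1).map
          (fun j => PySem.List.pyGetD x j 0)).all
        (fun v => decide (v ≤ PySem.List.pyGetD x (k : Int) 0)) := by
    rw [List.all_map]; rfl
  rw [hall, hmap]
  have h1 : (((k : Int) + 1).toNat) = k + 1 := by omega
  rw [h1, PySem.List.pyGetD_natCast, lgvCond]

theorem lgvCond_of_range' (x : List Int) (i : Int) (h : 0 ≤ i) :
    (PySem.List.pyRange (i + 1) (x.length : Int) 1).all
        (fun j => decide (PySem.List.pyGetD x j 0 ≤ PySem.List.pyGetD x i 0))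
      = lgvCond x i.toNat := by
  obtain ⟨k, rfl⟩ : ∃ k : Nat, i = (k : Int) := ⟨i.toNat, (Int.toNat_of_nonneg h).symm⟩
  rw [Int.toNat_natCast]
  exact lgvCond_of_range x k

-- A's outer fold as filter-then-map
theorem lgvFoldA (x : List Int) (ks : List Int)
    (h : ∀ i ∈ ks, 0 ≤ i ∧ i + 1 < (x.length : Int)) :
    ∀ (b : Bool) (out : List Int),
    (ks.foldl (fun (st : Bool × List Int) (i : Int) =>
        (lgvInner x (PySem.List.pyGetD x i 0)
           (PySem.List.pyRange (i + 1) (x.length : Int) 1) st.1,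
         if lgvInner x (PySem.List.pyGetD x i 0)
              (PySem.List.pyRange (i + 1) (x.length : Int) 1) st.1
         then st.2 ++ [PySem.List.pyGetD x i 0] else st.2)) (b, out)).2
      = out ++ (ks.filter (fun i => lgvCond x i.toNat)).map
          (fun i => x.getD i.toNat 0) := by
  induction ks with
  | nil => intro b out; simp
  | cons i rest ih =>
    intro b out
    obtain ⟨hi0, hk⟩ := h i (List.mem_cons_self ..)
    have hcons := PySem.List.pyRange_one_cons (a := i + 1)
      (b := (x.length : Int)) hk
    rw [List.foldl_cons]
    have hinner : lgvInner x (PySem.List.pyGetD x i 0)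
        (PySem.List.pyRange (i + 1) (x.length : Int) 1) b = lgvCond x i.toNat := by
      rw [hcons, lgvInner_ne_nil, ← hcons]
      exact lgvCond_of_range' x i hi0
    rw [hinner, ih (fun j hj => h j (List.mem_cons_of_mem _ hj))]
    rw [List.filter_cons]
    by_cases hc : lgvCond x i.toNat = true
    · have hget : PySem.List.pyGetD x i 0 = x.getD i.toNat 0 := by
        obtain ⟨k, rfl⟩ : ∃ k : Nat, i = (k : Int) :=
          ⟨i.toNat, (Int.toNat_of_nonneg hi0).symm⟩
        rw [PySem.List.pyGetD_natCast, Int.toNat_natCast]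
      simp [hc, hget]
    · simp [hc]

-- A as a pure filter/map over List.range
theorem lgvA_eq (x : List Int) (hx : x ≠ []) :
    left_greater_values x
      = ((List.range (x.length - 1)).filter (lgvCond x)).map (fun k => x.getD k 0)
        ++ [x.getD (x.length - 1) 0] := by
  have hone : 1 ≤ x.length := List.length_pos_iff.mpr hx
  simp only [left_greater_values]
  rw [lgvFoldA x (PySem.List.pyRange 0 ((x.length : Int) - 1) 1)
    (fun i hi => by
      have := (PySem.List.mem_pyRange_one (a := 0) (b := (x.length : Int) - 1)
        (x := i)).mp hi
      omega) true []]
  rw [List.nil_append]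
  have hlast : PySem.List.pyGetD x ((x.length : Int) - 1) 0 = x.getD (x.length - 1) 0 := by
    have h1 : ((x.length : Int) - 1) = ((x.length - 1 : Nat) : Int) := by omega
    rw [h1, PySem.List.pyGetD_natCast]
  rw [hlast]
  have hrange := PySem.List.pyRange_one (a := 0) (b := (x.length : Int) - 1)
  have hlen : (((x.length : Int) - 1 - 0).toNat) = x.length - 1 := by omega
  rw [hrange, hlen, List.filter_map, List.map_map]
  have hfil : (List.range (x.length - 1)).filter
        ((fun i => lgvCond x i.toNat) ∘ fun k : Nat => 0 + (k : Int))
      = (List.range (x.length - 1)).filter (lgvCond x) := by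
    refine List.filter_congr ?_
    intro k _
    simp
  rw [hfil]
  congr 1
  refine List.map_congr_left ?_
  intro k _
  simp

-- the filter/map form is lgvKeep, by structural induction
theorem lgvA_keep (x : List Int) (hx : x ≠ []) :
    ((List.range (x.length - 1)).filter (lgvCond x)).map (fun k => x.getD k 0)
        ++ [x.getD (x.length - 1) 0] = lgvKeep x := by
  induction x with
  | nil => exact absurd rfl hx
  | cons a l ih =>
    rcases eq_or_ne l [] with rfl | hl
    · simp [lgvCond, lgvKeep]
    · have hm : l.length = (l.length - 1) + 1 := by
        have := List.length_pos_iff.mpr hl; omega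
      have hlen1 : (a :: l).length - 1 = l.length := by simp
      rw [hlen1]
      have hrange : List.range l.length
          = 0 :: (List.range (l.length - 1)).map Nat.succ := by
        conv_lhs => rw [hm]
        rw [List.range_succ_eq_map]
      have hc1 : ∀ k : Nat, lgvCond (a :: l) (k + 1) = lgvCond l k := by
        intro k; simp [lgvCond]
      have hc0 : lgvCond (a :: l) 0 = l.all (fun y => decide (y ≤ a)) := by
        simp [lgvCond]
      have hlast : (a :: l).getD l.length 0 = l.getD (l.length - 1) 0 := by
        conv_lhs => rw [hm]
        exact List.getD_cons_succ ..
      have hfil : (List.range (l.length - 1)).filter (lgvCond (a :: l) ∘ Nat.succ)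
          = (List.range (l.length - 1)).filter (lgvCond l) := by
        refine List.filter_congr ?_
        intro k _
        simp only [Function.comp_apply, Nat.succ_eq_add_one, hc1]
      have hmapv : ((List.range (l.length - 1)).filter (lgvCond l)).map
            ((fun k => (a :: l).getD k 0) ∘ Nat.succ)
          = ((List.range (l.length - 1)).filter (lgvCond l)).map
            (fun k => l.getD k 0) := by
        refine List.map_congr_left ?_
        intro k _
        simp only [Function.comp_apply, Nat.succ_eq_add_one, List.getD_cons_succ]
      rw [hrange, List.filter_cons, List.filter_map, hfil]
      by_cases h0 : l.all (fun y => decide (y ≤ a)) = true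
      · have h0' : lgvCond (a :: l) 0 = true := by rw [hc0]; exact h0
        rw [if_pos h0', List.map_cons, List.map_map, hmapv, List.getD_cons_zero,
          hlast, List.cons_append, ih hl]
        simp [lgvKeep, h0]
      · have h0' : ¬ (lgvCond (a :: l) 0 = true) := by rw [hc0]; exact h0
        rw [if_neg h0', List.map_map, hmapv, hlast, ih hl]
        simp [lgvKeep, h0]

-- ===== VERDICT (by name: the statement is the Claim_ definition above) =====
theorem left_greater_values_spec : Claim_equal_left_greater_values := by
  intro x _ hx
  unfold Spec_left_greater_values
  rw [lgvB_eq_keep, lgvA_eq x hx, lgvA_keep x hx]
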